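-- pv_equiv track=rewrite | github.com/alisi1989/CLUES2-Companion | CLUES2Companion-Phase3.py | find_value_cols
-- ===== SOURCE A (Python) =====
-- def find_value_cols(header):
--     """Trova indici colonne chiave in un'inference.txt (robusto a piccole variazioni)."""
--     h2i = {h:i for i,h in enumerate(header)}
--     # -log10(p) può chiamarsi "-log10(p-value)" oppure "-log10(p)"
--     logp_key = None
--     for k in ("-log10(p-value)", "-log10(p)"):
--         if k in h2i: logp_key = k; break
--     # logLR
--     loglr_key = "logLR" if "logLR" in h2i else None
--     # EpochX_start/end & SelectionMLEx (preferisci X=2 se presente)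
--     sel_keys = [ (k, int(k.split("SelectionMLE")[1])) for k in header if k.startswith("SelectionMLE")]
--     epoch_start_keys = [ (k, int(k.split("Epoch")[1].split("_")[0])) for k in header if k.startswith("Epoch") and k.endswith("_start")]
--     epoch_end_keys   = [ (k, int(k.split("Epoch")[1].split("_")[0])) for k in header if k.startswith("Epoch") and k.endswith("_end")]
--     sel_by_k = {knum:kname for (kname, knum) in sel_keys}
--     es_by_k  = {knum:kname for (kname, knum) in epoch_start_keys}
--     ee_by_k  = {knum:kname for (kname, knum) in epoch_end_keys}
--     # Preferisci epoch 2 se completo, altrimenti l'ultimo disponibile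
--     preferred_k = None
--     if 2 in sel_by_k and 2 in es_by_k and 2 in ee_by_k:
--         preferred_k = 2
--     else:
--         avail = sorted(set(sel_by_k) & set(es_by_k) & set(ee_by_k))
--         preferred_k = avail[-1] if avail else None
--     return dict(
--         logp_key=logp_key,
--         loglr_key=loglr_key,
--         sel_key = sel_by_k.get(preferred_k),
--         e_start = es_by_k.get(preferred_k),
--         e_end   = ee_by_k.get(preferred_k)
--     )
-- ===== SOURCE B (Python) =====
-- def find_value_cols(header):
--     """Dict-free rewrite: tag each column once with a (role, number) label, pick the
--     preferred epoch from the labels, and recover each name by a reverse search for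
--     the last column carrying that label."""
--     def classify(h):
--         if h.startswith("SelectionMLE"):
--             return ("sel", int(h.split("SelectionMLE")[1]))
--         if h.startswith("Epoch"):
--             if h.endswith("_start"):
--                 return ("start", int(h.split("Epoch")[1].split("_")[0]))
--             if h.endswith("_end"):
--                 return ("end", int(h.split("Epoch")[1].split("_")[0]))
--         return None
--
--     roles = [classify(h) for h in header]
--
--     def complete(k):
--         return ("sel", k) in roles and ("start", k) in roles and ("end", k) in roles
--
--     if complete(2):
--         preferred_k = 2
--     else:
--         preferred_k = max((r[1] for r in roles if r is not None and complete(r[1])),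
--                           default=None)
--
--     def last_with(tag):
--         for h, r in zip(reversed(header), reversed(roles)):
--             if r == (tag, preferred_k):
--                 return h
--         return None
--
--     if "-log10(p-value)" in header:
--         logp_key = "-log10(p-value)"
--     elif "-log10(p)" in header:
--         logp_key = "-log10(p)"
--     else:
--         logp_key = None
--     return dict(
--         logp_key=logp_key,
--         loglr_key="logLR" if "logLR" in header else None,
--         sel_key=last_with("sel"),
--         e_start=last_with("start"),
--         e_end=last_with("end"),
--     )
-- ===== Notes on version B (the rewrite author's own statement) =====
-- stated objective: alternative
-- what changed: Replaces A's h2i lookup dict and three number-keyed dicts with a dict-free scheme: each column is tagged once with a (role, number) label, the preferred epoch is chosen by a completeness test plus max over the labels, and each returned name is recovered by a reverse search for the last column carrying that label (last occurrence = A's last dict write).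
import Mathlib
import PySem

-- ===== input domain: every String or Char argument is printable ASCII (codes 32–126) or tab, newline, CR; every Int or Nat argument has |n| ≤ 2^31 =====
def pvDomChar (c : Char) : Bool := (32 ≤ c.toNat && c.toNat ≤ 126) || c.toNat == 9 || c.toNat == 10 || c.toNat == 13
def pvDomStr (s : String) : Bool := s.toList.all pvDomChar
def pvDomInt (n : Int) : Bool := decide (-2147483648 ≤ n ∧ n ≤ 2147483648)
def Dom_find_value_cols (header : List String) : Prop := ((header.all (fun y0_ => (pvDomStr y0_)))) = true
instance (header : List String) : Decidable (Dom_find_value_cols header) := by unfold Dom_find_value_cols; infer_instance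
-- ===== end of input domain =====

-- B replaces A's lookup dict and three number-keyed dicts with a dict-free scheme: per-column
-- (role, number) labels, a completeness test + max for the preferred epoch, and a reverse
-- search for the last column carrying a label. (objective: alternative)

-- shared parse helpers (the identical int(k.split(...)...) expressions both Pythons contain)
def pvSelNum? (k : String) : Option Int :=
  PySem.Int.ofStr? (((PySem.Str.split? k "SelectionMLE").getD []).getD 1 "")

def pvEpochNum? (k : String) : Option Int :=
  PySem.Int.ofStr? (((PySem.Str.split? (((PySem.Str.split? k "Epoch").getD []).getD 1 "") "_").getD []).getD 0 "")

-- ===== PORT A =====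
def find_value_cols (header : List String) : List (String × Option String) :=
  let h2i : PySem.Dict String Int :=
    (PySem.List.enumerate header).foldl (fun d p => d.insert p.2 p.1) PySem.Dict.empty
  let logp_key : Option String :=
    ["-log10(p-value)", "-log10(p)"].foldl
      (fun acc k => match acc with
        | some _ => acc
        | none => if h2i.contains k then some k else none) none
  let loglr_key : Option String := if h2i.contains "logLR" then some "logLR" else none
  let sel_keys : List (String × Int) :=
    (header.filter (fun k => PySem.Str.startswith k "SelectionMLE")).map
      (fun k => (k, (pvSelNum? k).getD 0))
  let epoch_start_keys : List (String × Int) :=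
    (header.filter (fun k => PySem.Str.startswith k "Epoch" && PySem.Str.endswith k "_start")).map
      (fun k => (k, (pvEpochNum? k).getD 0))
  let epoch_end_keys : List (String × Int) :=
    (header.filter (fun k => PySem.Str.startswith k "Epoch" && PySem.Str.endswith k "_end")).map
      (fun k => (k, (pvEpochNum? k).getD 0))
  let sel_by_k : PySem.Dict Int String :=
    sel_keys.foldl (fun d p => d.insert p.2 p.1) PySem.Dict.empty
  let es_by_k : PySem.Dict Int String :=
    epoch_start_keys.foldl (fun d p => d.insert p.2 p.1) PySem.Dict.empty
  let ee_by_k : PySem.Dict Int String :=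
    epoch_end_keys.foldl (fun d p => d.insert p.2 p.1) PySem.Dict.empty
  let preferred_k : Option Int :=
    if sel_by_k.contains 2 && es_by_k.contains 2 && ee_by_k.contains 2 then some 2
    else
      let avail := PySem.List.sorted
        (PySem.Set.inter (PySem.Set.inter (PySem.Set.ofList sel_by_k.keys) es_by_k.keys) ee_by_k.keys)
        (fun x => x) false
      avail.getLast?
  [("logp_key", logp_key), ("loglr_key", loglr_key),
   ("sel_key", preferred_k.bind (fun k => sel_by_k.get? k)),
   ("e_start", preferred_k.bind (fun k => es_by_k.get? k)),
   ("e_end",   preferred_k.bind (fun k => ee_by_k.get? k))]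

-- ===== PORT B =====
-- classify(h) from Source B: the (role, number) label of a column, None if it is not an epoch column
def pvClassify (h : String) : Option (String × Int) :=
  if PySem.Str.startswith h "SelectionMLE" then some ("sel", (pvSelNum? h).getD 0)
  else if PySem.Str.startswith h "Epoch" then
    if PySem.Str.endswith h "_start" then some ("start", (pvEpochNum? h).getD 0)
    else if PySem.Str.endswith h "_end" then some ("end", (pvEpochNum? h).getD 0)
    else none
  else none

def find_value_cols_alt (header : List String) : List (String × Option String) :=
  let roles : List (Option (String × Int)) := header.map pvClassify
  let complete : Int → Bool := fun k =>
    roles.contains (some ("sel", k)) && roles.contains (some ("start", k)) &&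
      roles.contains (some ("end", k))
  let preferred_k : Option Int :=
    if complete 2 then some 2
    else PySem.List.max?
      (((roles.filterMap id).map Prod.snd).filter complete) (fun x => x)
  -- Source B compares r == (tag, preferred_k): with preferred_k=None that never matches, hence the none branch
  let last_with : String → Option String := fun tag =>
    match preferred_k with
    | none => none
    | some k =>
        ((header.zip roles).reverse.find? (fun p => p.2 == some (tag, k))).map Prod.fst
  let logp_key : Option String :=
    if header.contains "-log10(p-value)" then some "-log10(p-value)"
    else if header.contains "-log10(p)" then some "-log10(p)" else none
  [("logp_key", logp_key),
   ("loglr_key", if header.contains "logLR" then some "logLR" else none),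
   ("sel_key", last_with "sel"),
   ("e_start", last_with "start"),
   ("e_end",   last_with "end")]

-- ===== PRECONDITION & SPEC =====
-- Pre_ excludes exactly the headers on which Python A raises ValueError: a column starting with
-- "SelectionMLE" (resp. starting with "Epoch" and ending with "_start"/"_end") whose number part
-- is not a valid int literal.
def Pre_find_value_cols (header : List String) : Prop :=
  ∀ h ∈ header,
    (PySem.Str.startswith h "SelectionMLE" = true → (pvSelNum? h).isSome = true) ∧
    (PySem.Str.startswith h "Epoch" = true →
      (PySem.Str.endswith h "_start" = true ∨ PySem.Str.endswith h "_end" = true) →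
      (pvEpochNum? h).isSome = true)
instance (header : List String) : Decidable (Pre_find_value_cols header) := by
  unfold Pre_find_value_cols; infer_instance

def pvWitness_find_value_cols : List String :=
  ["ID", "-log10(p-value)", "logLR", "SelectionMLE1", "SelectionMLE2",
   "Epoch1_start", "Epoch1_end", "Epoch2_start", "Epoch2_end"]

def Spec_find_value_cols (header : List String) (out : List (String × Option String)) : Prop :=
  out = find_value_cols_alt header
instance (header : List String) (out : List (String × Option String)) :
    Decidable (Spec_find_value_cols header out) := by unfold Spec_find_value_cols; infer_instance

-- ===== CLAIM (what is proved, stated in full; the proofs are below) =====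
def Claim_equal_find_value_cols : Prop :=
  ∀ (header : List String), Dom_find_value_cols header → Pre_find_value_cols header →
    Spec_find_value_cols header (find_value_cols header)

-- ===== LEMMAS AND PROOFS =====

theorem pv_not_epoch_of_sel (h : String)
    (hs : PySem.Str.startswith h "SelectionMLE" = true) :
    PySem.Str.startswith h "Epoch" = false := by
  rw [Bool.eq_false_iff]
  intro he
  have hs' : ("SelectionMLE".toList) <+: h.toList := by
    rw [← PySem.Chars.startswith_iff]; simpa using hs
  have he' : ("Epoch".toList) <+: h.toList := by
    rw [← PySem.Chars.startswith_iff]; simpa using he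
  rcases List.prefix_or_prefix_of_prefix hs' he' with h1 | h1
  · exact absurd h1 (by decide)
  · exact absurd h1 (by decide)

theorem pv_not_end_of_start (h : String)
    (hs : PySem.Str.endswith h "_start" = true) :
    PySem.Str.endswith h "_end" = false := by
  rw [Bool.eq_false_iff]
  intro he
  have hs' : ("_start".toList) <:+ h.toList := by
    rw [← PySem.Chars.endswith_iff]; simpa using hs
  have he' : ("_end".toList) <:+ h.toList := by
    rw [← PySem.Chars.endswith_iff]; simpa using he
  rcases List.suffix_or_suffix_of_suffix hs' he' with h1 | h1
  · exact absurd h1 (by decide)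
  · exact absurd h1 (by decide)

-- the classify label matched against (tag, k), for each of the three tags
theorem pv_classify_sel (h : String) (k : Int) :
    (pvClassify h == some ("sel", k))
      = (PySem.Str.startswith h "SelectionMLE" && ((pvSelNum? h).getD 0 == k)) := by
  unfold pvClassify
  cases h1 : PySem.Str.startswith h "SelectionMLE"
  · simp only [Bool.false_and, Bool.false_eq_true, if_false]
    split_ifs <;> simp
  · simp

theorem pv_classify_start (h : String) (k : Int) :
    (pvClassify h == some ("start", k))
      = (PySem.Str.startswith h "Epoch" && PySem.Str.endswith h "_start"
          && ((pvEpochNum? h).getD 0 == k)) := by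
  unfold pvClassify
  cases h1 : PySem.Str.startswith h "SelectionMLE"
  · simp only [Bool.false_eq_true, if_false]
    cases h2 : PySem.Str.startswith h "Epoch"
    · simp
    · cases h3 : PySem.Str.endswith h "_start"
      · cases h4 : PySem.Str.endswith h "_end" <;> simp
      · simp
  · rw [pv_not_epoch_of_sel h h1]
    simp

theorem pv_classify_end (h : String) (k : Int) :
    (pvClassify h == some ("end", k))
      = (PySem.Str.startswith h "Epoch" && PySem.Str.endswith h "_end"
          && ((pvEpochNum? h).getD 0 == k)) := by
  unfold pvClassify
  cases h1 : PySem.Str.startswith h "SelectionMLE"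
  · simp only [Bool.false_eq_true, if_false]
    cases h2 : PySem.Str.startswith h "Epoch"
    · simp
    · cases h3 : PySem.Str.endswith h "_start"
      · cases h4 : PySem.Str.endswith h "_end" <;> simp
      · rw [pv_not_end_of_start h h3]
        simp
  · rw [pv_not_epoch_of_sel h h1]
    simp

-- a number→name dict built by A's fold: any lookup is the LAST pair with that number
theorem pv_get?_foldl_insert (l : List (String × Int)) (d : PySem.Dict Int String) (k : Int) :
    (l.foldl (fun d p => d.insert p.2 p.1) d).get? k
      = match l.reverse.find? (fun p => p.2 == k) with
        | some p => some p.1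
        | none => d.get? k := by
  induction l generalizing d with
  | nil => simp
  | cons h t ih =>
    rw [List.foldl_cons, ih, List.reverse_cons, List.find?_append]
    cases hf : t.reverse.find? (fun p => p.2 == k) with
    | some p => simp
    | none =>
      by_cases hk : h.2 = k
      · subst hk
        simp [PySem.Dict.get?_insert_self]
      · simp [hk, PySem.Dict.get?_insert_of_ne _ _ (Ne.symm hk)]

-- A's filtered name→number pairs vs B's labelled header, searched for the same (tag, k)
theorem pv_find_eq (l : List String) (P : String → Bool) (num : String → Int)
    (tag : String) (k : Int)
    (hc : ∀ h, (pvClassify h == some (tag, k)) = (P h && (num h == k))) :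
    (((l.filter P).map (fun h => (h, num h))).find? (fun p => p.2 == k)).map Prod.fst
      = ((l.map (fun h => (h, pvClassify h))).find? (fun p => p.2 == some (tag, k))).map
          Prod.fst := by
  induction l with
  | nil => simp
  | cons h t ih =>
    simp only [List.filter_cons, List.map_cons]
    by_cases hP : P h = true
    · simp only [hP, if_true, List.map_cons]
      by_cases hk : num h = k
      · rw [List.find?_cons_of_pos (by simp [hk]),
            List.find?_cons_of_pos (by rw [hc h]; simp [hP, hk])]
        simp
      · rw [List.find?_cons_of_neg (by simp [hk]),
            List.find?_cons_of_neg (by rw [hc h]; simp [hk])]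
        exact ih
    · have hP' : P h = false := by simpa using hP
      simp only [hP', Bool.false_eq_true, if_false]
      rw [List.find?_cons_of_neg (by rw [hc h]; simp [hP'])]
      exact ih

-- membership in A's number-key lists vs B's labels
theorem pv_mem_nums (l : List String) (P : String → Bool) (num : String → Int)
    (tag : String) (k : Int)
    (hc : ∀ h, (pvClassify h == some (tag, k)) = (P h && (num h == k))) :
    (k ∈ ((l.filter P).map (fun h => (h, num h))).map Prod.snd)
      ↔ some (tag, k) ∈ l.map pvClassify := by
  simp only [List.map_map, List.mem_map, List.mem_filter, Function.comp]
  constructor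
  · rintro ⟨h, ⟨hm, hP⟩, hk⟩
    exact ⟨h, hm, by have := hc h; simp [hP, hk] at this; simpa using this⟩
  · rintro ⟨h, hm, hcl⟩
    have := hc h
    rw [hcl] at this
    simp only [BEq.rfl] at this
    obtain ⟨hP, hk⟩ := (Bool.and_eq_true _ _).mp this.symm
    exact ⟨h, ⟨hm, hP⟩, by simpa using hk⟩

theorem pv_h2i_contains (header : List String) (k : String) :
    ((PySem.List.enumerate header).foldl
        (fun (d : PySem.Dict String Int) p => d.insert p.2 p.1) PySem.Dict.empty).contains k
      = header.contains k := by
  have hk := PySem.Dict.keys_foldl_insert_key (ν := Int) (PySem.List.enumerate header)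
      (fun p => p.2) (fun _ p => p.1) PySem.Dict.empty
  rw [PySem.Dict.contains_eq_decide_mem_keys, hk]
  simp [PySem.Dict.keys_empty, PySem.List.map_snd_enumerate, PySem.Set.update,
    ← PySem.Set.ofList_eq_foldl, PySem.Set.mem_ofList]

-- two Int lists with the same members have the same max
theorem pv_max_congr (xs ys : List Int) (h : ∀ x : Int, x ∈ xs ↔ x ∈ ys) :
    PySem.List.max? xs (fun x => x) = PySem.List.max? ys (fun x => x) := by
  rcases hx : PySem.List.max? xs (fun x => x) with _ | m
  · have hnil : xs = [] := (PySem.List.max?_eq_none_iff xs _).mp hx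
    subst hnil
    rcases hy : PySem.List.max? ys (fun x => x) with _ | m'
    · rfl
    · have := PySem.List.max?_mem hy
      rw [← h] at this; simp at this
  · rcases hy : PySem.List.max? ys (fun x => x) with _ | m'
    · have hnil : ys = [] := (PySem.List.max?_eq_none_iff ys _).mp hy
      subst hnil
      have := PySem.List.max?_mem hx
      rw [h] at this; simp at this
    · have h1 : m ≤ m' := PySem.List.max?_isMax hy m ((h m).mp (PySem.List.max?_mem hx))
      have h2 : m' ≤ m := PySem.List.max?_isMax hx m' ((h m').mpr (PySem.List.max?_mem hy))
      exact congrArg some (le_antisymm h1 h2)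

theorem pv_getLast_sorted_eq_max (xs : List Int) :
    (PySem.List.sorted xs (fun x => x) false).getLast? = PySem.List.max? xs (fun x => x) := by
  rcases hx : PySem.List.max? xs (fun x => x) with _ | m
  · have hnil : xs = [] := (PySem.List.max?_eq_none_iff xs _).mp hx
    simp [hnil, PySem.List.sorted]
  · have hm : m ∈ xs := PySem.List.max?_mem hx
    have hmax := PySem.List.max?_isMax hx
    set s := PySem.List.sorted xs (fun x => x) false with hs
    have hne : s ≠ [] := by
      rw [hs, Ne, PySem.List.sorted_eq_nil_iff]
      rintro rfl; simp at hm
    rw [List.getLast?_eq_some_getLast hne]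
    congr 1
    have hlast_mem : s.getLast hne ∈ xs := by
      rw [← PySem.List.mem_sorted xs (fun x => x) false]
      exact List.getLast_mem hne
    have h1 : s.getLast hne ≤ m := hmax _ hlast_mem
    have h2 : m ≤ s.getLast hne := by
      have hmem : m ∈ s := (PySem.List.mem_sorted xs _ false m).mpr hm
      obtain ⟨i, hi, hieq⟩ := List.mem_iff_getElem.mp hmem
      rw [List.getLast_eq_getElem]
      calc m = s[i] := hieq.symm
        _ ≤ s[s.length - 1] := by
            have := PySem.List.sorted_id_getElem_mono xs (p := i) (q := s.length - 1)
              (by omega) (by rw [← hs]; omega)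
            simpa [← hs] using this
    omega

-- A's dict.contains at k equals B's label membership, for each tag
theorem pv_contains_eq (header : List String) (P : String → Bool) (num : String → Int)
    (tag : String) (k : Int)
    (hc : ∀ h, (pvClassify h == some (tag, k)) = (P h && (num h == k))) :
    (((header.filter P).map (fun h => (h, num h))).foldl
        (fun (d : PySem.Dict Int String) p => d.insert p.2 p.1) PySem.Dict.empty).contains k
      = (header.map pvClassify).contains (some (tag, k)) := by
  have hk := PySem.Dict.keys_foldl_insert_key (ν := String)
      ((header.filter P).map (fun h => (h, num h)))
      (fun p => p.2) (fun _ p => p.1) PySem.Dict.empty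
  rw [PySem.Dict.contains_eq_decide_mem_keys, hk]
  have := pv_mem_nums header P num tag k hc
  simp only [PySem.Dict.keys_empty, PySem.Set.update, ← PySem.Set.ofList_eq_foldl]
  rw [Bool.eq_iff_iff]
  simp only [decide_eq_true_eq, PySem.Set.mem_ofList, List.contains_iff_mem]
  exact this

-- A's dict lookup at k is B's reverse search for the last column labelled (tag, k)
theorem pv_lookup_eq (header : List String) (P : String → Bool) (num : String → Int)
    (tag : String) (k : Int)
    (hc : ∀ h, (pvClassify h == some (tag, k)) = (P h && (num h == k))) :
    (((header.filter P).map (fun h => (h, num h))).foldl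
        (fun (d : PySem.Dict Int String) p => d.insert p.2 p.1) PySem.Dict.empty).get? k
      = ((header.zip (header.map pvClassify)).reverse.find?
          (fun p => p.2 == some (tag, k))).map Prod.fst := by
  rw [pv_get?_foldl_insert]
  have hmatch : ∀ (o : Option (String × Int)),
      (match o with
        | some p => some p.1
        | none => (PySem.Dict.empty : PySem.Dict Int String).get? k) = o.map Prod.fst := by
    intro o; cases o <;> simp
  rw [hmatch]
  have hz : ∀ l : List String, l.zip (l.map pvClassify) = l.map (fun h => (h, pvClassify h)) := by
    intro l
    induction l with
    | nil => rfl
    | cons a t ih => simp [ih]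
  have hrev : ((header.filter P).map (fun h => (h, num h))).reverse
      = ((header.reverse.filter P).map (fun h => (h, num h))) := by
    rw [← List.map_reverse, List.filter_reverse]
  rw [hz header, hrev, ← List.map_reverse]
  exact pv_find_eq header.reverse P num tag k hc

-- membership in A's available-epoch set is membership in B's candidate list
theorem pv_avail_mem (header : List String) : ∀ x : Int,
    (x ∈ PySem.Set.inter (PySem.Set.inter (PySem.Set.ofList
        (((header.filter (fun k => PySem.Str.startswith k "SelectionMLE")).map
            (fun k => (k, (pvSelNum? k).getD 0))).foldl
          (fun (d : PySem.Dict Int String) p => d.insert p.2 p.1) PySem.Dict.empty).keys)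
        (((header.filter (fun k => PySem.Str.startswith k "Epoch" && PySem.Str.endswith k "_start")).map
            (fun k => (k, (pvEpochNum? k).getD 0))).foldl
          (fun (d : PySem.Dict Int String) p => d.insert p.2 p.1) PySem.Dict.empty).keys)
        (((header.filter (fun k => PySem.Str.startswith k "Epoch" && PySem.Str.endswith k "_end")).map
            (fun k => (k, (pvEpochNum? k).getD 0))).foldl
          (fun (d : PySem.Dict Int String) p => d.insert p.2 p.1) PySem.Dict.empty).keys)
      ↔ (x ∈ ((((header.map pvClassify).filterMap id).map Prod.snd).filter
          (fun k => (header.map pvClassify).contains (some ("sel", k)) &&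
            (header.map pvClassify).contains (some ("start", k)) &&
            (header.map pvClassify).contains (some ("end", k))))) := by
  intro x
  have hkeys : ∀ (P : String → Bool) (num : String → Int),
      (((header.filter P).map (fun h => (h, num h))).foldl
        (fun (d : PySem.Dict Int String) p => d.insert p.2 p.1) PySem.Dict.empty).keys
      = PySem.Set.ofList (((header.filter P).map (fun h => (h, num h))).map Prod.snd) := by
    intro P num
    rw [PySem.Dict.keys_foldl_insert_key ((header.filter P).map (fun h => (h, num h)))
      (fun p => p.2) (fun _ p => p.1) PySem.Dict.empty]
    simp [PySem.Dict.keys_empty, PySem.Set.update, ← PySem.Set.ofList_eq_foldl]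
  rw [hkeys, hkeys, hkeys]
  have h1 := pv_mem_nums header _ _ "sel" x (fun h => pv_classify_sel h x)
  have h2 := pv_mem_nums header _ _ "start" x (fun h => pv_classify_start h x)
  have h3 := pv_mem_nums header _ _ "end" x (fun h => pv_classify_end h x)
  rw [List.mem_filter]
  simp only [PySem.Set.mem_inter, PySem.Set.mem_ofList, h1, h2, h3, Bool.and_eq_true,
    List.contains_iff_mem]
  simp only [List.mem_map, List.mem_filterMap, id_eq]
  constructor
  · rintro ⟨⟨hs, ha⟩, hb⟩
    exact ⟨⟨("sel", x), ⟨some ("sel", x), hs, rfl⟩, rfl⟩, ⟨hs, ha⟩, hb⟩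
  · rintro ⟨_, ⟨hs, ha⟩, hb⟩
    exact ⟨⟨hs, ha⟩, hb⟩

-- Source B's r == (tag, preferred_k) match written as a bind, to line both ports up
theorem pv_match_eq_bind (o : Option Int) (f : Int → Option String) :
    (match o with | none => none | some k => f k) = o.bind f := by
  cases o <;> rfl

-- ===== VERDICT (by name: the statement is the Claim_ definition above) =====
theorem find_value_cols_spec : Claim_equal_find_value_cols := by
  intro header _ _
  unfold Spec_find_value_cols find_value_cols find_value_cols_alt
  have hl1 := fun k : Int => pv_lookup_eq header
    (fun s => PySem.Str.startswith s "SelectionMLE")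
    (fun s => (pvSelNum? s).getD 0) "sel" k (fun h => pv_classify_sel h k)
  have hl2 := fun k : Int => pv_lookup_eq header
    (fun s => PySem.Str.startswith s "Epoch" && PySem.Str.endswith s "_start")
    (fun s => (pvEpochNum? s).getD 0) "start" k (fun h => pv_classify_start h k)
  have hl3 := fun k : Int => pv_lookup_eq header
    (fun s => PySem.Str.startswith s "Epoch" && PySem.Str.endswith s "_end")
    (fun s => (pvEpochNum? s).getD 0) "end" k (fun h => pv_classify_end h k)
  simp only [pv_h2i_contains, pv_getLast_sorted_eq_max,
    pv_max_congr _ _ (pv_avail_mem header),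
    pv_contains_eq header _ _ "sel" 2 (fun h => pv_classify_sel h 2),
    pv_contains_eq header _ _ "start" 2 (fun h => pv_classify_start h 2),
    pv_contains_eq header _ _ "end" 2 (fun h => pv_classify_end h 2),
    hl1, hl2, hl3, pv_match_eq_bind, List.foldl_cons, List.foldl_nil]
  by_cases c1 : "-log10(p-value)" ∈ header
  · simp [c1]
  · by_cases c2 : "-log10(p)" ∈ header
    · simp [c1, c2]
    · simp [c1, c2]
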